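-- pv_equiv track=rewrite | github.com/OkidNorbert/BAKO-AI-V0.0 | back-end/analytics_engine/transition_effort.py | _detect_possession_changes
-- ===== SOURCE A (Python) =====
-- from typing import Dict, Any, List
--
-- def _detect_possession_changes(
--
--     ball_possession: List[int],
--     player_assignment: List[Dict]
-- ) -> List[Dict]:
--     """
--     Detect frames where possession changes between teams.
--
--     Args:
--         ball_possession: Per-frame possession (track_id or -1)
--         player_assignment: Per-frame team assignments
--
--     Returns:
--         List of possession change events
--     """
--     changes = []
--     prev_team = None
--
--     for frame_idx in range(len(ball_possession)):
--         if frame_idx >= len(player_assignment):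
--             break
--
--         possession_player = ball_possession[frame_idx]
--         if possession_player == -1:
--             continue
--
--         assignment = player_assignment[frame_idx]
--         if possession_player not in assignment:
--             continue
--
--         current_team = assignment[possession_player]
--
--         if prev_team is not None and current_team != prev_team:
--             changes.append({
--                 "frame": frame_idx,
--                 "old_team": prev_team,
--                 "new_team": current_team
--             })
--
--         prev_team = current_team
--
--     return changes
-- ===== SOURCE B (Python) =====
-- from typing import Dict, Any, List
--
-- def _detect_possession_changes(
--     ball_possession: List[int],
--     player_assignment: List[Dict]
-- ) -> List[Dict]:
--     n = min(len(ball_possession), len(player_assignment))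
--     valid = []
--     for i in range(n):
--         p = ball_possession[i]
--         if p == -1:
--             continue
--         a = player_assignment[i]
--         if p in a:
--             valid.append((i, a[p]))
--     changes = []
--     for (f0, t0), (f1, t1) in zip(valid, valid[1:]):
--         if t1 != t0:
--             changes.append({"frame": f1, "old_team": t0, "new_team": t1})
--     return changes
-- ===== Notes on version B (the rewrite author's own statement) =====
-- stated objective: alternative
-- what changed: Replaces A's single stateful loop (running prev_team accumulator with skip/continue rules) by a two-phase decomposition: one pass building the filtered table of (frame, team) valid-possession entries, then a pairwise zip over consecutive entries emitting a change event whenever the team differs.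
import Mathlib
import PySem

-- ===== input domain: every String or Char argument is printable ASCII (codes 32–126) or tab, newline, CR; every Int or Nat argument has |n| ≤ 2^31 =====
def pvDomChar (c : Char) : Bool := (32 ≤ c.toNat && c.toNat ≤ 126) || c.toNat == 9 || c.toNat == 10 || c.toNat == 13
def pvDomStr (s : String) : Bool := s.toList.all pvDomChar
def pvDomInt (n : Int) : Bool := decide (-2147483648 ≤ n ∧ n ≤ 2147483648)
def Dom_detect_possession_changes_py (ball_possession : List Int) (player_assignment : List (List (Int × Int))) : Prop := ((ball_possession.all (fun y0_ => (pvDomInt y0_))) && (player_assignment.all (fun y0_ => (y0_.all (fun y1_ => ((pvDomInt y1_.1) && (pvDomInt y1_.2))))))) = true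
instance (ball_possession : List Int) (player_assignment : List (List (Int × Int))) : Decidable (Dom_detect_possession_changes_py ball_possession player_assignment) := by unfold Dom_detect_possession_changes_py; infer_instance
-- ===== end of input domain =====

-- B replaces A's single stateful prev_team loop by a filtered (frame, team) table plus a
-- pairwise comparison of consecutive entries (objective: alternative decomposition, same cost).

-- ===== PORT A =====
-- A's for-loop with break/continue, transliterated as index recursion carrying (prev_team, changes).
def detect_possession_changes_py_loop (bp : List Int) (pa : List (List (Int × Int)))
    (i : Nat) (prev : Option Int) (changes : List (List (String × Int))) :
    List (List (String × Int)) :=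
  if _h : i < bp.length then
    if pa.length ≤ i then changes          -- break
    else
      let possession_player := bp.getD i 0  -- index i is in range here, so getD is exact
      if possession_player == -1 then
        detect_possession_changes_py_loop bp pa (i+1) prev changes   -- continue
      else
        let assignment := pa.getD i []
        match assignment.find? (fun kv => kv.1 == possession_player) with
        | none => detect_possession_changes_py_loop bp pa (i+1) prev changes  -- continue
        | some kv =>
          let current_team := kv.2
          let changes' :=
            match prev with
            | some pt =>
              if current_team ≠ pt then
                changes ++ [[("frame", (i : Int)), ("old_team", pt), ("new_team", current_team)]]
              else changes
            | none => changes
          detect_possession_changes_py_loop bp pa (i+1) (some current_team) changes'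
  else changes
termination_by bp.length - i

def detect_possession_changes_py (ball_possession : List Int) (player_assignment : List (List (Int × Int))) : List (List (String × Int)) :=
  detect_possession_changes_py_loop ball_possession player_assignment 0 none []

-- ===== PORT B =====
-- one valid-possession entry for frame i (frame index as Int together with its team), or none
def pvAltStep (bp : List Int) (pa : List (List (Int × Int))) (i : Nat) : Option (Int × Int) :=
  let p := bp.getD i 0
  if p == -1 then none
  else
    match (pa.getD i []).find? (fun kv => kv.1 == p) with
    | none => none
    | some kv => some ((i : Int), kv.2)

def detect_possession_changes_py_alt (ball_possession : List Int) (player_assignment : List (List (Int × Int))) : List (List (String × Int)) :=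
  let n := min ball_possession.length player_assignment.length
  let valid := (List.range n).filterMap (pvAltStep ball_possession player_assignment)
  (valid.zip valid.tail).filterMap (fun pr =>
    if pr.2.2 ≠ pr.1.2 then
      some [("frame", pr.2.1), ("old_team", pr.1.2), ("new_team", pr.2.2)]
    else none)

-- ===== PRECONDITION & SPEC =====
def Spec_detect_possession_changes_py (ball_possession : List Int) (player_assignment : List (List (Int × Int))) (out : List (List (String × Int))) : Prop := out = detect_possession_changes_py_alt ball_possession player_assignment
instance (ball_possession : List Int) (player_assignment : List (List (Int × Int))) (out : List (List (String × Int))) : Decidable (Spec_detect_possession_changes_py ball_possession player_assignment out) := by unfold Spec_detect_possession_changes_py; infer_instance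

-- ===== CLAIM (what is proved, stated in full; the proofs are below) =====
def Claim_equal_detect_possession_changes_py : Prop := ∀ (ball_possession : List Int) (player_assignment : List (List (Int × Int))), Dom_detect_possession_changes_py ball_possession player_assignment → Spec_detect_possession_changes_py ball_possession player_assignment (detect_possession_changes_py ball_possession player_assignment)

-- ===== LEMMAS AND PROOFS =====

-- the events A's loop emits when started with prev_team = prev on the valid entries l
def pvChain (prev : Option Int) : List (Int × Int) → List (List (String × Int))
  | [] => []
  | (f, t) :: rest =>
    (match prev with
     | some pt => if t ≠ pt then [[("frame", f), ("old_team", pt), ("new_team", t)]] else []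
     | none => []) ++ pvChain (some t) rest

theorem pvLoop_eq_chain (bp : List Int) (pa : List (List (Int × Int))) :
    ∀ (i : Nat) (prev : Option Int) (changes : List (List (String × Int))),
    detect_possession_changes_py_loop bp pa i prev changes
      = changes ++ pvChain prev
          ((List.range' i (min bp.length pa.length - i)).filterMap (pvAltStep bp pa)) := by
  intro i
  induction hk : min bp.length pa.length - i using Nat.strong_induction_on generalizing i with
  | _ k ih =>
    intro prev changes
    rw [detect_possession_changes_py_loop]
    by_cases hb : i < bp.length
    · by_cases hp : pa.length ≤ i
      · have hk0 : k = 0 := by omega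
        subst hk0
        simp [hb, hp, pvChain]
      · have hrec : min bp.length pa.length - (i+1) < k := by omega
        rw [show k = (min bp.length pa.length - (i+1)) + 1 from by omega,
            List.range'_succ, List.filterMap_cons]
        rw [dif_pos hb, if_neg hp]
        by_cases h1 : (bp.getD i 0 == -1) = true
        · have hstep : pvAltStep bp pa i = none := by
            simp only [pvAltStep]
            rw [if_pos h1]
          rw [if_pos h1]
          simp only [hstep]
          rw [ih _ hrec _ rfl]
        · rw [if_neg h1]
          cases hfind : (pa.getD i []).find? (fun kv => kv.1 == bp.getD i 0) with
          | none =>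
            have hstep : pvAltStep bp pa i = none := by
              simp only [pvAltStep]
              rw [if_neg h1, hfind]
            simp only [hstep, hfind]
            rw [ih _ hrec _ rfl]
          | some kv =>
            have hstep : pvAltStep bp pa i = some ((i : Int), kv.2) := by
              simp only [pvAltStep]
              rw [if_neg h1, hfind]
            simp only [hstep, hfind]
            rw [ih _ hrec _ rfl]
            simp only [pvChain]
            cases prev with
            | none => simp
            | some pt =>
              by_cases he : kv.2 ≠ pt <;> simp [he]
    · have hk0 : k = 0 := by omega
      subst hk0
      simp [hb, pvChain]

theorem pvPairs_eq_chain_some (f : Int) (t : Int) (l : List (Int × Int)) :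
    ((((f, t) :: l).zip l).filterMap (fun pr =>
      if pr.2.2 ≠ pr.1.2 then
        some [("frame", pr.2.1), ("old_team", pr.1.2), ("new_team", pr.2.2)]
      else none))
      = pvChain (some t) l := by
  induction l generalizing f t with
  | nil => simp [pvChain]
  | cons x l ih =>
    obtain ⟨f1, t1⟩ := x
    rw [List.zip_cons_cons, List.filterMap_cons, ih f1 t1]
    by_cases h : t1 ≠ t <;> simp [pvChain, h]

theorem pvPairs_eq_chain_none (l : List (Int × Int)) :
    ((l.zip l.tail).filterMap (fun pr =>
      if pr.2.2 ≠ pr.1.2 then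
        some [("frame", pr.2.1), ("old_team", pr.1.2), ("new_team", pr.2.2)]
      else none))
      = pvChain none l := by
  cases l with
  | nil => simp [pvChain]
  | cons x l =>
    obtain ⟨f, t⟩ := x
    rw [List.tail_cons, pvPairs_eq_chain_some]
    simp only [pvChain]
    simp

-- ===== VERDICT (by name: the statement is the Claim_ definition above) =====
theorem detect_possession_changes_py_spec : Claim_equal_detect_possession_changes_py := by
  intro bp pa _
  unfold Spec_detect_possession_changes_py detect_possession_changes_py detect_possession_changes_py_alt
  rw [pvLoop_eq_chain, ← pvPairs_eq_chain_none]
  simp [List.range_eq_range']
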